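-- pv_equiv track=rewrite | github.com/nadajinny/ChatterPals | backend/service-text/records.py | _build_width_array
-- ===== SOURCE A (Python) =====
-- from typing import Dict, List, Optional
--
-- def _build_width_array(width_map: Dict[int, int]) -> str:
--     if not width_map:
--         return '[]'
--     parts: List[str] = []
--     sorted_glyphs = sorted(width_map.keys())
--     start = sorted_glyphs[0]
--     prev = start
--     current = [width_map[start]]
--     for gid in sorted_glyphs[1:]:
--         if gid == prev + 1:
--             current.append(width_map[gid])
--         else:
--             parts.append(f"{start} [{' '.join(str(w) for w in current)}]")
--             start = gid
--             current = [width_map[gid]]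
--         prev = gid
--     parts.append(f"{start} [{' '.join(str(w) for w in current)}]")
--     return '[' + ' '.join(parts) + ']'
-- ===== SOURCE B (Python) =====
-- from typing import Dict, List, Optional
--
-- def _build_width_array(width_map: Dict[int, int]) -> str:
--     if not width_map:
--         return '[]'
--     keys = set(width_map)
--     parts: List[str] = []
--     for start in sorted(g for g in keys if g - 1 not in keys):
--         widths: List[str] = []
--         g = start
--         while g in keys:
--             widths.append(str(width_map[g]))
--             g += 1
--         parts.append(f"{start} [{' '.join(widths)}]")
--     return '[' + ' '.join(parts) + ']'
-- ===== Notes on version B (the rewrite author's own statement) =====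
-- stated objective: alternative
-- what changed: Instead of sorting all keys and scanning neighbours for breaks, B finds run starts by hash-set membership (g with g-1 not in the set), sorts only those starts, and walks each run forward by repeated set lookups g, g+1, ... until a gap.
import Mathlib
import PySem

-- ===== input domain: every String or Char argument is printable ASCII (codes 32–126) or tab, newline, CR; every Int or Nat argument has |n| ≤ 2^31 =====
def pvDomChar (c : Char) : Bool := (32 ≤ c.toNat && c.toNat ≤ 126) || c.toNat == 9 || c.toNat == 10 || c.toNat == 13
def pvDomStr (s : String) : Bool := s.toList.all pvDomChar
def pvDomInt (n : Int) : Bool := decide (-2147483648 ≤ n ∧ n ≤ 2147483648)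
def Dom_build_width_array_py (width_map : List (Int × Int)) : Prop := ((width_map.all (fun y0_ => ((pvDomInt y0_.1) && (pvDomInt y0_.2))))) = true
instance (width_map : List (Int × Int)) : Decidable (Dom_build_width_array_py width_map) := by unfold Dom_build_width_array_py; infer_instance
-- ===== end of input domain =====

-- B replaces A's sort-all-keys-and-scan-for-breaks pass by a hash-set algorithm: run starts are
-- the keys g with g-1 not in the key set, only those are sorted, and each run is walked forward
-- by membership tests g, g+1, … until a gap (objective: alternative algorithm, same output).

-- ===== PORT A =====
-- f"{start} [{' '.join(str(w) for w in current)}]"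
def pvFmtA (start : Int) (current : List Int) : String :=
  PySem.Int.toStr start ++ " [" ++ String.intercalate " " (current.map PySem.Int.toStr) ++ "]"

-- the for-loop over sorted_glyphs[1:] with state (parts, start, prev, current)
def pvAfold (d : PySem.Dict Int Int) :
    List String → Int → Int → List Int → List Int → List String
  | parts, start, _prev, current, [] => parts ++ [pvFmtA start current]
  | parts, start, prev, current, gid :: t =>
    if gid = prev + 1 then
      pvAfold d parts start gid (current ++ [d.getD gid 0]) t
    else
      pvAfold d (parts ++ [pvFmtA start current]) gid gid [d.getD gid 0] t

def build_width_array_py (width_map : List (Int × Int)) : String :=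
  let d := PySem.Dict.ofList width_map
  if d.items = [] then "[]"
  else
    match PySem.List.sorted d.keys (fun x => x) false with
    | [] => "[]"   -- unreachable: the dict is nonempty here
    | start :: rest =>
      "[" ++ String.intercalate " " (pvAfold d [] start start [d.getD start 0] rest) ++ "]"

-- ===== PORT B =====
-- termination measure for the while loop: key-set elements not yet passed by g
lemma pvWalk_dec (keys : List Int) (g : Int) (h : g ∈ keys) :
    (keys.filter (fun x => decide (g + 1 ≤ x))).length <
      (keys.filter (fun x => decide (g ≤ x))).length := by
  induction keys with
  | nil => cases h
  | cons a t ih =>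
    simp only [List.filter_cons]
    rcases List.mem_cons.mp h with rfl | hmem
    · have h1 : ¬ (g + 1 ≤ g) := by omega
      have h2 : g ≤ g := le_rfl
      simp only [h1, h2, decide_true, decide_false, Bool.false_eq_true, if_false, if_true,
        List.length_cons]
      have hle : (t.filter (fun x => decide (g + 1 ≤ x))).length ≤
          (t.filter (fun x => decide (g ≤ x))).length := by
        clear ih h
        induction t with
        | nil => simp
        | cons b u ihu =>
          simp only [List.filter_cons]
          by_cases hb : g + 1 ≤ b
          · have hb' : g ≤ b := by omega
            simp only [hb, hb', decide_true, if_true, List.length_cons]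
            omega
          · by_cases hb' : g ≤ b
            · simp only [hb, hb', decide_true, decide_false, Bool.false_eq_true, if_false,
                if_true, List.length_cons]
              omega
            · simp only [hb, hb', decide_false, Bool.false_eq_true, if_false]
              exact ihu
      omega
    · by_cases hb : g + 1 ≤ a
      · have hb' : g ≤ a := by omega
        simp only [hb, hb', decide_true, if_true, List.length_cons]
        exact Nat.succ_lt_succ (ih hmem)
      · by_cases hb' : g ≤ a
        · simp only [hb, hb', decide_true, decide_false, Bool.false_eq_true, if_false, if_true,
            List.length_cons]
          exact Nat.lt_succ_of_lt (ih hmem)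
        · simp only [hb, hb', decide_false, Bool.false_eq_true, if_false]
          exact ih hmem

-- the while loop: collect str(width_map[g]) for g, g+1, … while g in keys
def pvWalk (d : PySem.Dict Int Int) (keys : List Int) (g : Int) : List String :=
  if h : g ∈ keys then PySem.Int.toStr (d.getD g 0) :: pvWalk d keys (g + 1) else []
  termination_by (keys.filter (fun x => decide (g ≤ x))).length
  decreasing_by exact pvWalk_dec keys g h

-- f"{start} [{' '.join(widths)}]" for one run start
def pvFmtWalk (d : PySem.Dict Int Int) (keys : List Int) (s : Int) : String :=
  PySem.Int.toStr s ++ " [" ++ String.intercalate " " (pvWalk d keys s) ++ "]"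

def build_width_array_py_alt (width_map : List (Int × Int)) : String :=
  if width_map = [] then "[]"
  else
    let keys : PySem.Set Int := PySem.Set.ofList (width_map.map Prod.fst)
    let d := PySem.Dict.ofList width_map
    let starts := PySem.List.sorted (keys.filter (fun g => !decide ((g - 1) ∈ keys)))
      (fun x => x) false
    "[" ++ String.intercalate " " (starts.map (pvFmtWalk d keys)) ++ "]"

-- ===== PRECONDITION & SPEC =====
def Spec_build_width_array_py (width_map : List (Int × Int)) (out : String) : Prop := out = build_width_array_py_alt width_map
instance (width_map : List (Int × Int)) (out : String) : Decidable (Spec_build_width_array_py width_map out) := by unfold Spec_build_width_array_py; infer_instance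

-- ===== CLAIM (what is proved, stated in full; the proofs are below) =====
def Claim_equal_build_width_array_py : Prop := ∀ (width_map : List (Int × Int)), Dom_build_width_array_py width_map → Spec_build_width_array_py width_map (build_width_array_py width_map)

-- ===== LEMMAS AND PROOFS =====

-- split off the maximal consecutive run continuing prev
def pvTakeRun : Int → List Int → List Int × List Int
  | _, [] => ([], [])
  | prev, g :: t =>
    if g = prev + 1 then
      let p := pvTakeRun g t
      (g :: p.1, p.2)
    else ([], g :: t)

lemma pvTakeRun_snd_le (p : Int) (t : List Int) : (pvTakeRun p t).2.length ≤ t.length := by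
  induction t generalizing p with
  | nil => simp [pvTakeRun]
  | cons g t ih =>
    simp only [pvTakeRun]
    split
    · exact le_trans (ih g) (Nat.le_succ _)
    · simp

-- the maximal consecutive runs of a list, in order
def pvRuns : List Int → List (List Int)
  | [] => []
  | g :: t => (g :: (pvTakeRun g t).1) :: pvRuns (pvTakeRun g t).2
  termination_by l => l.length
  decreasing_by exact Nat.lt_succ_of_le (pvTakeRun_snd_le g t)

-- common formatting of one run of glyph ids
def pvFmtB (d : PySem.Dict Int Int) (g : List Int) : String :=
  PySem.Int.toStr (g.headD 0) ++ " [" ++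
    String.intercalate " " (g.map (fun x => PySem.Int.toStr (d.getD x 0))) ++ "]"

-- A's loop, started on any state, produces: the flushed parts, then the current group extended
-- by the run continuing prev, then the formatting of the remaining runs.
lemma pvAfold_eq_runs (d : PySem.Dict Int Int) (rest : List Int) :
    ∀ (parts : List String) (start prev : Int) (current : List Int),
    pvAfold d parts start prev current rest =
      parts ++ pvFmtA start (current ++ (pvTakeRun prev rest).1.map (fun x => d.getD x 0)) ::
        (pvRuns (pvTakeRun prev rest).2).map (pvFmtB d) := by
  induction rest with
  | nil => intro parts start prev current; simp [pvAfold, pvTakeRun, pvRuns]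
  | cons g t ih =>
    intro parts start prev current
    simp only [pvAfold, pvTakeRun]
    split
    · rw [ih]
      simp
    · rw [ih]
      simp only [pvRuns, List.map_cons, List.map_nil, List.append_nil]
      simp [pvFmtA, pvFmtB, List.append_assoc, Function.comp_def]

-- pvTakeRun splits its argument
lemma pvTakeRun_append (p : Int) (t : List Int) :
    t = (pvTakeRun p t).1 ++ (pvTakeRun p t).2 := by
  induction t generalizing p with
  | nil => simp [pvTakeRun]
  | cons g t ih =>
    simp only [pvTakeRun]
    split
    · rename_i hg
      simpa using ih g
    · simp

-- the run is the block of consecutive integers after p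
lemma pvTakeRun_shape (p : Int) (t : List Int) :
    (pvTakeRun p t).1 =
      (List.range (pvTakeRun p t).1.length).map (fun i : Nat => p + 1 + (i : Int)) := by
  induction t generalizing p with
  | nil => simp [pvTakeRun]
  | cons g t ih =>
    by_cases hg : g = p + 1
    · subst hg
      have h1 : (pvTakeRun p ((p + 1) :: t)).1 = (p + 1) :: (pvTakeRun (p + 1) t).1 := by
        simp [pvTakeRun]
      rw [h1, List.length_cons]
      conv_rhs => rw [List.range_succ_eq_map]
      rw [List.map_cons, List.map_map]
      refine List.cons_eq_cons.mpr ⟨by norm_num, ?_⟩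
      conv_lhs => rw [ih (p + 1)]
      apply List.map_congr_left
      intro i _
      simp only [Function.comp_apply]
      push_cast
      ring
    · simp [pvTakeRun, hg]

-- membership in the run
lemma pvTakeRun_mem (p : Int) (t : List Int) (x : Int) :
    x ∈ (pvTakeRun p t).1 ↔ p + 1 ≤ x ∧ x ≤ p + ((pvTakeRun p t).1.length : Int) := by
  conv_lhs => rw [pvTakeRun_shape p t]
  simp only [List.mem_map, List.mem_range]
  constructor
  · rintro ⟨i, hi, rfl⟩
    omega
  · rintro ⟨h1, h2⟩
    exact ⟨(x - p - 1).toNat, by omega, by omega⟩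

-- the remainder does not continue the run
lemma pvTakeRun_rest_head (p : Int) (t : List Int) (q : Int) (t' : List Int)
    (h : (pvTakeRun p t).2 = q :: t') : q ≠ p + ((pvTakeRun p t).1.length : Int) + 1 := by
  induction t generalizing p with
  | nil => simp [pvTakeRun] at h
  | cons g t ih =>
    by_cases hg : g = p + 1
    · subst hg
      have h1 : (pvTakeRun p ((p + 1) :: t)).2 = (pvTakeRun (p + 1) t).2 := by simp [pvTakeRun]
      have h2 : (pvTakeRun p ((p + 1) :: t)).1 = (p + 1) :: (pvTakeRun (p + 1) t).1 := by
        simp [pvTakeRun]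
      rw [h1] at h
      have := ih (p + 1) h
      rw [h2, List.length_cons]
      push_cast at this ⊢
      omega
    · simp only [pvTakeRun, if_neg hg] at h ⊢
      cases h
      simpa using hg

-- pvWalk only depends on membership at or beyond the start
lemma pvWalk_congr (d : PySem.Dict Int Int) (keys keys' : List Int) (s : Int)
    (h : ∀ y, s ≤ y → (y ∈ keys ↔ y ∈ keys')) : pvWalk d keys s = pvWalk d keys' s := by
  conv_lhs => rw [pvWalk]
  conv_rhs => rw [pvWalk]
  by_cases hs : s ∈ keys
  · have hs' : s ∈ keys' := (h s le_rfl).mp hs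
    rw [dif_pos hs, dif_pos hs',
      pvWalk_congr d keys keys' (s + 1) (fun y hy => h y (by omega))]
  · have hs' : s ∉ keys' := fun hx => hs ((h s le_rfl).mpr hx)
    rw [dif_neg hs, dif_neg hs']
  termination_by (keys.filter (fun x => decide (s ≤ x))).length
  decreasing_by exact pvWalk_dec keys s hs

-- pvWalk on a consecutive block [h, h+m] bounded by a gap at h+m+1
lemma pvWalk_consec (d : PySem.Dict Int Int) (keys : List Int) (h : Int) (m : Nat)
    (hin : ∀ i : Nat, i ≤ m → (h + (i : Int)) ∈ keys) (hout : (h + (m : Int) + 1) ∉ keys) :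
    pvWalk d keys h =
      (List.range (m + 1)).map (fun i : Nat => PySem.Int.toStr (d.getD (h + (i : Int)) 0)) := by
  induction m generalizing h with
  | zero =>
    have h0 : h ∈ keys := by simpa using hin 0 (le_refl 0)
    rw [pvWalk, dif_pos h0, pvWalk]
    have h1 : h + 1 ∉ keys := by simpa using hout
    rw [dif_neg h1]
    simp
  | succ m ihm =>
    have h0 : h ∈ keys := by simpa using hin 0 (by omega)
    rw [pvWalk, dif_pos h0]
    rw [ihm (h + 1)
      (fun i hi => by
        have hx := hin (i + 1) (by omega)
        have he : h + 1 + (i : Int) = h + ((i + 1 : Nat) : Int) := by push_cast; ring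
        rw [he]
        exact hx)
      (by
        have he : h + 1 + (m : Int) + 1 = h + ((m + 1 : Nat) : Int) + 1 := by push_cast; ring
        rw [he]
        exact hout)]
    conv_rhs => rw [List.range_succ_eq_map]
    rw [List.map_cons, List.map_map]
    refine List.cons_eq_cons.mpr ⟨by norm_num, ?_⟩
    apply List.map_congr_left
    intro i _
    simp only [Function.comp_apply]
    have he : h + ((i + 1 : Nat) : Int) = h + 1 + (i : Int) := by push_cast; ring
    rw [Nat.succ_eq_add_one, he]

-- the main lemma: on a strictly increasing list, B's run-start filter + forward walk produces
-- exactly the formatted maximal runs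
lemma pvMain (d : PySem.Dict Int Int) (L : List Int) (hL : L.Pairwise (· < ·)) :
    (L.filter (fun g => !decide ((g - 1) ∈ L))).map (pvFmtWalk d L) =
      (pvRuns L).map (pvFmtB d) := by
  suffices H : ∀ n (L : List Int), L.length ≤ n → L.Pairwise (· < ·) →
      (L.filter (fun g => !decide ((g - 1) ∈ L))).map (pvFmtWalk d L) =
        (pvRuns L).map (pvFmtB d) by exact H L.length L le_rfl hL
  intro n
  induction n with
  | zero =>
    intro L hlen _
    have hnil : L = [] := List.eq_nil_of_length_eq_zero (Nat.le_zero.mp hlen)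
    subst hnil
    simp [pvRuns]
  | succ n ihn =>
    intro L hlen hL
    cases L with
    | nil => simp [pvRuns]
    | cons p t =>
    obtain ⟨run, rest, hrr⟩ : ∃ r s, pvTakeRun p t = (r, s) := ⟨_, _, rfl⟩
    have hsplit : t = run ++ rest := by
      have h0 := pvTakeRun_append p t
      rw [hrr] at h0
      exact h0
    have hrunchar : ∀ x : Int, x ∈ run ↔ p + 1 ≤ x ∧ x ≤ p + (run.length : Int) := by
      intro x
      have h0 := pvTakeRun_mem p t x
      rw [hrr] at h0
      exact h0
    have hresthead : ∀ q t', rest = q :: t' → q ≠ p + (run.length : Int) + 1 := by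
      intro q t' hqt
      have h0 := pvTakeRun_rest_head p t q t'
      rw [hrr] at h0
      exact h0 hqt
    have hshape : run = (List.range run.length).map (fun i : Nat => p + 1 + (i : Int)) := by
      have h0 := pvTakeRun_shape p t
      rw [hrr] at h0
      exact h0
    subst hsplit
    have hpt : ∀ x ∈ run ++ rest, p < x := fun x hx => (List.pairwise_cons.mp hL).1 x hx
    have hTpw : (run ++ rest).Pairwise (· < ·) := (List.pairwise_cons.mp hL).2
    have hrest_pw : rest.Pairwise (· < ·) := (List.pairwise_append.mp hTpw).2.1
    have hrun_rest : ∀ x ∈ run, ∀ y ∈ rest, x < y := (List.pairwise_append.mp hTpw).2.2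
    have hrest_big : ∀ x ∈ rest, p + (run.length : Int) + 1 < x := by
      cases hr : rest with
      | nil => simp
      | cons q t' =>
        subst hr
        have hqne : q ≠ p + (run.length : Int) + 1 := hresthead q t' rfl
        have hqgt : p + (run.length : Int) < q := by
          by_cases hm : run.length = 0
          · have hq : q ∈ run ++ q :: t' := by simp
            have := hpt q hq
            omega
          · have hmemrun : p + (run.length : Int) ∈ run :=
              (hrunchar _).mpr ⟨by omega, le_refl _⟩
            exact hrun_rest _ hmemrun q (by simp)
        intro x hx
        rcases List.mem_cons.mp hx with rfl | hx'
        · omega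
        · have : q < x := (List.pairwise_cons.mp hrest_pw).1 x hx'
          omega
    have hmemL : ∀ y : Int, y ∈ p :: (run ++ rest) ↔
        (p ≤ y ∧ y ≤ p + (run.length : Int)) ∨ y ∈ rest := by
      intro y
      rw [List.mem_cons, List.mem_append, hrunchar]
      constructor
      · rintro (rfl | ⟨h1, h2⟩ | hy)
        · exact Or.inl ⟨le_refl _, by omega⟩
        · exact Or.inl ⟨by omega, h2⟩
        · exact Or.inr hy
      · rintro (⟨h1, h2⟩ | hy)
        · by_cases hyp : y = p
          · exact Or.inl hyp
          · exact Or.inr (Or.inl ⟨by omega, h2⟩)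
        · exact Or.inr (Or.inr hy)
    -- Step A: the run-start filter keeps p and reduces to the remainder
    have hp_notin : ((p : Int) - 1) ∉ p :: (run ++ rest) := by
      intro hx
      rcases (hmemL _).mp hx with ⟨h1, _⟩ | hy
      · omega
      · have := hrest_big _ hy
        omega
    have hfilter : (p :: (run ++ rest)).filter
          (fun g => !decide ((g - 1) ∈ p :: (run ++ rest))) =
        p :: rest.filter (fun g => !decide ((g - 1) ∈ rest)) := by
      rw [List.filter_cons]
      have hcond : (!decide ((p : Int) - 1 ∈ p :: (run ++ rest))) = true := by simp [hp_notin]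
      rw [if_pos hcond]
      congr 1
      rw [List.filter_append]
      have h1 : run.filter (fun g => !decide ((g - 1) ∈ p :: (run ++ rest))) = [] := by
        apply List.filter_eq_nil_iff.mpr
        intro a ha
        have ha2 := (hrunchar a).mp ha
        have : a - 1 ∈ p :: (run ++ rest) := (hmemL _).mpr (Or.inl ⟨by omega, by omega⟩)
        simp [this]
      have h2 : rest.filter (fun g => !decide ((g - 1) ∈ p :: (run ++ rest))) =
          rest.filter (fun g => !decide ((g - 1) ∈ rest)) := by
        apply List.filter_congr
        intro a ha
        have hbig := hrest_big a ha
        have hiff : (a - 1 ∈ p :: (run ++ rest)) ↔ (a - 1 ∈ rest) := by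
          rw [hmemL]
          constructor
          · rintro (⟨h1', h2'⟩ | hy)
            · omega
            · exact hy
          · exact fun hy => Or.inr hy
        simp only [hiff]
      rw [h1, h2, List.nil_append]
    -- Step B: the walk from p covers exactly the first run
    have hwalkp : pvWalk d (p :: (run ++ rest)) p =
        (List.range (run.length + 1)).map
          (fun i : Nat => PySem.Int.toStr (d.getD (p + (i : Int)) 0)) := by
      apply pvWalk_consec
      · intro i hi
        exact (hmemL _).mpr (Or.inl ⟨by omega, by omega⟩)
      · intro hx
        rcases (hmemL _).mp hx with ⟨_, h2⟩ | hy
        · omega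
        · have := hrest_big _ hy
          omega
    have hlist : (List.range (run.length + 1)).map
          (fun i : Nat => PySem.Int.toStr (d.getD (p + (i : Int)) 0)) =
        (p :: run).map (fun x => PySem.Int.toStr (d.getD x 0)) := by
      conv_lhs => rw [List.range_succ_eq_map]
      rw [List.map_cons, List.map_map, List.map_cons]
      refine List.cons_eq_cons.mpr ⟨by norm_num, ?_⟩
      conv_rhs => rw [hshape]
      rw [List.map_map]
      apply List.map_congr_left
      intro i _
      simp only [Function.comp_apply]
      have he : p + ((i + 1 : Nat) : Int) = p + 1 + (i : Int) := by push_cast; ring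
      rw [Nat.succ_eq_add_one, he]
    have hfmtp : pvFmtWalk d (p :: (run ++ rest)) p = pvFmtB d (p :: run) := by
      unfold pvFmtWalk pvFmtB
      rw [hwalkp, hlist]
      rfl
    -- Step C: walks from remainder elements never revisit the first run
    have htail : ∀ x ∈ rest.filter (fun g => !decide ((g - 1) ∈ rest)),
        pvFmtWalk d (p :: (run ++ rest)) x = pvFmtWalk d rest x := by
      intro x hx
      have hxr : x ∈ rest := List.mem_of_mem_filter hx
      have hbig := hrest_big x hxr
      unfold pvFmtWalk
      rw [pvWalk_congr d (p :: (run ++ rest)) rest x]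
      intro y hy
      rw [hmemL]
      constructor
      · rintro (⟨h1, h2⟩ | hy')
        · omega
        · exact hy'
      · exact fun hy' => Or.inr hy'
    -- Step D: recurse on the remainder, Step E: peel one run off pvRuns
    have hrec : (rest.filter (fun g => !decide ((g - 1) ∈ rest))).map (pvFmtWalk d rest) =
        (pvRuns rest).map (pvFmtB d) := by
      apply ihn rest ?_ hrest_pw
      simp only [List.length_cons, List.length_append] at hlen
      omega
    have hruns : pvRuns (p :: (run ++ rest)) = (p :: run) :: pvRuns rest := by
      rw [pvRuns, hrr]
    rw [hfilter, List.map_cons, hfmtp, List.map_congr_left htail, hrec, hruns, List.map_cons]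

-- the dict's keys are the key set, in first-insertion order
lemma pvKeys_ofList (l : List (Int × Int)) :
    (PySem.Dict.ofList l).keys = PySem.Set.ofList (l.map Prod.fst) := by
  simp [PySem.Dict.ofList, PySem.Dict.update, PySem.Dict.keys_foldl_insert_key,
    PySem.Set.update_nil_left]

theorem build_width_array_py_eq_alt (width_map : List (Int × Int)) :
    build_width_array_py width_map = build_width_array_py_alt width_map := by
  by_cases hw : width_map = []
  · subst hw; rfl
  · simp only [build_width_array_py, build_width_array_py_alt, if_neg hw]
    set d := PySem.Dict.ofList width_map with hd
    set S := PySem.Set.ofList (width_map.map Prod.fst) with hS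
    have hkeys : d.keys = S := pvKeys_ofList width_map
    have hSne : S ≠ [] := by
      obtain ⟨x, l, rfl⟩ := List.exists_cons_of_ne_nil hw
      have hx : x.1 ∈ S := by
        rw [hS, PySem.Set.mem_ofList]
        simp
      exact List.ne_nil_of_mem hx
    have hitems : d.items ≠ [] := by
      intro h
      apply hSne
      rw [← hkeys]
      simp [PySem.Dict.keys, h]
    rw [if_neg hitems, hkeys]
    set K := PySem.List.sorted S (fun x => x) false with hKdef
    have hKperm : K.Perm S := PySem.List.sorted_perm S (fun x => x) false
    have hmemK : ∀ x : Int, x ∈ K ↔ x ∈ S := fun x => PySem.List.mem_sorted S (fun x => x) false x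
    have hKne : K ≠ [] := by
      intro h
      exact hSne ((List.Perm.nil_eq (h ▸ hKperm)).symm)
    have hnodupK : K.Nodup := hKperm.nodup_iff.mpr (PySem.Set.nodup_ofList _)
    have hKle : K.Pairwise (fun a b => a ≤ b) := by
      simpa using PySem.List.sorted_pairwise S (fun x => x)
    have hKlt : K.Pairwise (· < ·) :=
      (hKle.and hnodupK).imp (fun h => lt_of_le_of_ne h.1 h.2)
    -- B's side equals the formatted maximal runs of the sorted key list
    have hfilters : S.filter (fun g => !decide ((g - 1) ∈ S)) =
        S.filter (fun g => !decide ((g - 1) ∈ K)) := by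
      apply List.filter_congr
      intro a _
      simp only [hmemK]
    have hsortedF :
        PySem.List.sorted (S.filter (fun g => !decide ((g - 1) ∈ K))) (fun x => x) false =
          K.filter (fun g => !decide ((g - 1) ∈ K)) := by
      apply PySem.List.sorted_eq_of_perm_of_pairwise_lt
      · exact hKperm.filter _
      · exact hKlt.filter _
    have hwalks : ∀ s : Int, pvFmtWalk d S s = pvFmtWalk d K s := by
      intro s
      unfold pvFmtWalk
      rw [pvWalk_congr d S K s (fun y _ => (hmemK y).symm)]
    have hB : (PySem.List.sorted (S.filter (fun g => !decide ((g - 1) ∈ S)))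
          (fun x => x) false).map (pvFmtWalk d S) = (pvRuns K).map (pvFmtB d) := by
      rw [hfilters, hsortedF, List.map_congr_left (fun x _ => hwalks x), pvMain d K hKlt]
    rw [hB]
    -- A's side: destruct the sorted key list and unwind the loop
    obtain ⟨start, rest, hK⟩ := List.exists_cons_of_ne_nil hKne
    rw [hK]
    simp only [pvAfold_eq_runs, pvRuns, List.nil_append, List.map_cons]
    simp [pvFmtA, pvFmtB, Function.comp_def]

-- ===== VERDICT (by name: the statement is the Claim_ definition above) =====
theorem build_width_array_py_spec : Claim_equal_build_width_array_py := by
  intro width_map _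
  exact build_width_array_py_eq_alt width_map
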